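-- pv_equiv track=rewrite | github.com/lunalovecode/misc-problems | unfinished-problems/harana.py | optimal_key
-- ===== SOURCE A (Python) =====
-- def offkeyness(notes_1, notes_2):
--     return sum([abs(a - b) for a, b in zip(notes_1, notes_2)])
--
-- def optimal_key(notes_1, notes_2):
--     diffs = [b - a for a, b in zip(notes_1, notes_2)]
--     k = 0
--     min_offkey = 10000
--     for d in diffs:
--         o = offkeyness(notes_2, [x + d for x in notes_1])
--         if o < min_offkey:
--             k = d
--             min_offkey = o
--     return k
-- ===== SOURCE B (Python) =====
-- def optimal_key(notes_1, notes_2):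
--     diffs = [b - a for a, b in zip(notes_1, notes_2)]
--     s = sorted(diffs)
--     n = len(s)
--     total = sum(s)
--     cost = {}
--     pref = 0
--     j = 0
--     for v in s:
--         cost[v] = v * j - pref + (total - pref - v * (n - j))
--         pref += v
--         j += 1
--     k = 0
--     best = 10000
--     for d in diffs:
--         o = cost[d]
--         if o < best:
--             k = d
--             best = o
--     return k
-- ===== Notes on version B (the rewrite author's own statement) =====
-- stated objective: faster
-- what changed: B sorts the diffs once and builds a value->cost dict from running prefix sums, so each candidate's summed absolute deviation is a lookup instead of A's O(n) offkeyness rescan per candidate.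
import Mathlib
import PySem

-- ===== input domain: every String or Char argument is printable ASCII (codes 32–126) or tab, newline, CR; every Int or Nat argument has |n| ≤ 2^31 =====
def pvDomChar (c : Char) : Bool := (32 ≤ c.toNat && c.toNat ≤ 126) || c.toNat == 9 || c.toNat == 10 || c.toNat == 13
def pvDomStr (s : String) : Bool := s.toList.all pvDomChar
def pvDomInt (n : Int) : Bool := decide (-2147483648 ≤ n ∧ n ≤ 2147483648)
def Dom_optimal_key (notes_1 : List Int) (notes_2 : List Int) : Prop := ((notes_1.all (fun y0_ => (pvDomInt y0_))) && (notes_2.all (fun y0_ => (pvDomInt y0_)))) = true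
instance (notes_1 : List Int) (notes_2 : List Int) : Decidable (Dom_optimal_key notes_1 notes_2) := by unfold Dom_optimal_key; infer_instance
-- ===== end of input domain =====

-- B replaces A's quadratic rescan (offkeyness recomputed for every candidate shift) by sorting the
-- diffs once and reading every candidate's cost from prefix sums collected in one pass (objective: faster).

-- ===== PORT A =====
def offkeyness (notes_1 : List Int) (notes_2 : List Int) : Int :=
  ((notes_1.zip notes_2).map (fun p => |p.1 - p.2|)).sum

def optimal_key (notes_1 : List Int) (notes_2 : List Int) : Int :=
  let diffs := (notes_1.zip notes_2).map (fun p => p.2 - p.1)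
  (diffs.foldl (fun (st : Int × Int) d =>
      let o := offkeyness notes_2 (notes_1.map (fun x => x + d))
      if o < st.2 then (d, o) else st) (0, 10000)).1

-- ===== PORT B =====
-- loop body of Source B's first loop: state = (cost dict, pref, j)
def costStep (total n : Int) (st : PySem.Dict Int Int × Int × Int) (v : Int) :
    PySem.Dict Int Int × Int × Int :=
  (st.1.insert v (v * st.2.2 - st.2.1 + (total - st.2.1 - v * (n - st.2.2))),
   st.2.1 + v, st.2.2 + 1)

def optimal_key_alt (notes_1 : List Int) (notes_2 : List Int) : Int :=
  let diffs := (notes_1.zip notes_2).map (fun p => p.2 - p.1)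
  let s := PySem.List.sorted diffs (fun x => x)
  let n : Int := (s.length : Int)
  let total := s.sum
  let cost := (s.foldl (costStep total n) (PySem.Dict.empty, 0, 0)).1
  (diffs.foldl (fun (st : Int × Int) d =>
      let o := cost.getD d 0
      if o < st.2 then (d, o) else st) (0, 10000)).1

-- ===== PRECONDITION & SPEC =====
def Spec_optimal_key (notes_1 : List Int) (notes_2 : List Int) (out : Int) : Prop := out = optimal_key_alt notes_1 notes_2
instance (notes_1 : List Int) (notes_2 : List Int) (out : Int) : Decidable (Spec_optimal_key notes_1 notes_2 out) := by unfold Spec_optimal_key; infer_instance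

-- ===== CLAIM (what is proved, stated in full; the proofs are below) =====
def Claim_equal_optimal_key : Prop := ∀ (notes_1 : List Int) (notes_2 : List Int), Dom_optimal_key notes_1 notes_2 → Spec_optimal_key notes_1 notes_2 (optimal_key notes_1 notes_2)

-- ===== LEMMAS AND PROOFS =====

-- total absolute deviation of the list s from the shift d
def absSum (s : List Int) (d : Int) : Int := (s.map (fun x => |x - d|)).sum

lemma sum_map_sub_left (v : Int) (t : List Int) :
    (t.map (fun x => v - x)).sum = v * t.length - t.sum := by
  induction t with
  | nil => simp
  | cons a t ih => simp [ih]; ring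

lemma sum_map_sub_right (v : Int) (t : List Int) :
    (t.map (fun x => x - v)).sum = t.sum - v * t.length := by
  induction t with
  | nil => simp
  | cons a t ih => simp [ih]; ring

-- the prefix-sum formula stored by Source B at position t1.length equals the full absolute deviation
lemma stored_eq_absSum (s t1 t2 : List Int) (v : Int)
    (hsplit : s = t1 ++ v :: t2) (hs : s.Pairwise (· ≤ ·)) :
    v * (t1.length : Int) - t1.sum + (s.sum - t1.sum - v * ((s.length : Int) - t1.length))
      = absSum s v := by
  subst hsplit
  rw [List.pairwise_append] at hs
  obtain ⟨h1, h2, h12⟩ := hs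
  rw [List.pairwise_cons] at h2
  obtain ⟨hv, _⟩ := h2
  have ht1 : ∀ x ∈ t1, x ≤ v := fun x hx => h12 x hx v (by simp)
  have e1 : t1.map (fun x => |x - v|) = t1.map (fun x => v - x) := by
    apply List.map_congr_left
    intro x hx
    have := ht1 x hx
    rw [abs_of_nonpos (by omega)]; ring
  have e2 : t2.map (fun x => |x - v|) = t2.map (fun x => x - v) := by
    apply List.map_congr_left
    intro x hx
    have := hv x hx
    rw [abs_of_nonneg (by omega)]
  simp only [absSum, List.map_append, List.map_cons, List.sum_append, List.sum_cons,
    List.sum_append, e1, e2, sum_map_sub_left, sum_map_sub_right,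
    List.length_append, List.length_cons]
  push_cast
  ring_nf
  simp

-- invariant of Source B's first loop: every value stored in the cost dict is the absolute deviation of
-- its key, the keys stay nodup, and every processed element is a key
lemma costFold_inv (s : List Int) (hs : s.Pairwise (· ≤ ·)) :
    ∀ (t2 t1 : List Int) (d : PySem.Dict Int Int),
      s = t1 ++ t2 →
      (∀ p ∈ d.items, p.2 = absSum s p.1) → d.keys.Nodup →
      (∀ p ∈ (t2.foldl (costStep s.sum (s.length : Int)) (d, t1.sum, (t1.length : Int))).1.items,
          p.2 = absSum s p.1)
      ∧ (t2.foldl (costStep s.sum (s.length : Int)) (d, t1.sum, (t1.length : Int))).1.keys.Nodup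
      ∧ (∀ k ∈ t2,
          k ∈ (t2.foldl (costStep s.sum (s.length : Int)) (d, t1.sum, (t1.length : Int))).1.keys) := by
  intro t2
  induction t2 with
  | nil => intro t1 d _ hinv hnd; exact ⟨hinv, hnd, by simp⟩
  | cons v t2 ih =>
    intro t1 d hsplit hinv hnd
    have hstored := stored_eq_absSum s t1 t2 v hsplit hs
    have step1 : costStep s.sum (s.length : Int) (d, t1.sum, (t1.length : Int)) v
        = (d.insert v (absSum s v), (t1 ++ [v]).sum, ((t1 ++ [v]).length : Int)) := by
      simp only [costStep, List.sum_append, List.length_append, List.sum_cons, List.length_cons]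
      refine Prod.ext ?_ (Prod.ext ?_ ?_) <;> simp [hstored]
    have hinv' : ∀ p ∈ (d.insert v (absSum s v)).items, p.2 = absSum s p.1 := by
      intro p hp
      rcases (PySem.Dict.mem_items_insert d v (absSum s v) p).1 hp with h | ⟨h, _⟩
      · subst h; rfl
      · exact hinv p h
    have hsplit' : s = (t1 ++ [v]) ++ t2 := by simpa using hsplit
    have := ih (t1 ++ [v]) (d.insert v (absSum s v)) hsplit' hinv'
      (PySem.Dict.nodup_keys_insert d v (absSum s v) hnd)
    rw [List.foldl_cons, step1]
    refine ⟨this.1, this.2.1, ?_⟩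
    intro k hk
    rcases List.mem_cons.1 hk with h | h
    · subst h
      -- v is a key after the insert, and further inserts keep keys
      have hkeymem : ∀ (l : List Int) (st : PySem.Dict Int Int × Int × Int),
          k ∈ st.1.keys → k ∈ (l.foldl (costStep s.sum (s.length : Int)) st).1.keys := by
        intro l
        induction l with
        | nil => intro st h; exact h
        | cons w l ihl =>
          intro st h
          apply ihl
          simp only [costStep]
          exact (PySem.Dict.mem_keys_insert _ _ _ _).2 (Or.inr h)
      exact hkeymem t2 _ ((PySem.Dict.mem_keys_insert _ _ _ _).2 (Or.inl rfl))
    · exact this.2.2 k h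

-- looking up any element of s in the finished cost dict yields its absolute deviation
lemma cost_getD (s : List Int) (hs : s.Pairwise (· ≤ ·)) (k : Int) (hk : k ∈ s) :
    ((s.foldl (costStep s.sum (s.length : Int)) (PySem.Dict.empty, 0, 0)).1).getD k 0
      = absSum s k := by
  have h := costFold_inv s hs s [] PySem.Dict.empty (by simp) (by simp [PySem.Dict.empty]) (by simp)
  set D := (s.foldl (costStep s.sum (s.length : Int)) (PySem.Dict.empty, 0, 0)).1 with hD
  have hkey : k ∈ D.keys := h.2.2 k hk
  rcases ho : D.get? k with _ | v
  · exact absurd ((PySem.Dict.get?_eq_none_iff_not_mem_keys D k).1 ho) (by simp [hkey])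
  · have hmem := ((PySem.Dict.get?_eq_some_iff_mem_items D k v h.2.1).1 ho)
    have := h.1 (k, v) hmem
    rw [PySem.Dict.getD_eq_get?_getD, ho]
    simpa using this

-- A's per-candidate cost is the absolute-deviation sum over the diffs
lemma offkey_eq (l1 l2 : List Int) (d : Int) :
    offkeyness l2 (l1.map (fun x => x + d))
      = absSum ((l1.zip l2).map (fun p => p.2 - p.1)) d := by
  induction l1 generalizing l2 with
  | nil => simp [offkeyness, absSum]
  | cons a l1 ih =>
    cases l2 with
    | nil => simp [offkeyness, absSum]
    | cons b l2 =>
      simp only [offkeyness, absSum, List.map_cons, List.zip_cons_cons, List.sum_cons] at *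
      rw [show b - (a + d) = b - a - d by ring]
      rw [ih l2]

-- absSum is invariant under sorting (a permutation)
lemma absSum_sorted (xs : List Int) (d : Int) :
    absSum (PySem.List.sorted xs (fun x => x)) d = absSum xs d := by
  unfold absSum
  exact ((PySem.List.sorted_perm xs (fun x => x) false).map _).sum_eq

-- ===== VERDICT (by name: the statement is the Claim_ definition above) =====
theorem optimal_key_spec : Claim_equal_optimal_key := by
  intro notes_1 notes_2 _
  unfold Spec_optimal_key optimal_key optimal_key_alt
  simp only []
  congr 1
  apply PySem.List.foldl_congr_mem
  intro acc x hx
  have hxs : x ∈ PySem.List.sorted ((notes_1.zip notes_2).map (fun p => p.2 - p.1)) (fun x => x) :=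
    (PySem.List.mem_sorted _ _ _ _).2 hx
  rw [offkey_eq notes_1 notes_2 x,
    cost_getD _ (PySem.List.sorted_pairwise _ _) x hxs,
    absSum_sorted]
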